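-- pv_equiv track=rewrite | github.com/fantauzd/Dynamic-Programming-Practice | block.py | block_puzzle_bottomup
-- ===== SOURCE A (Python) =====
-- def block_puzzle_bottomup(n):
--     # initialize array to store solutions
--     vals = [0] * n
--     #add base cases to solutions array as needed
--     if n >= 1:
--         vals[0] = 1
--     if n >= 2:
--         vals[1] = 2
--     # start from the simplest problem and use previous solutions to solve each subproblem
--     for i in range(3,n+1):
--             vals[i-1] = vals[i-2] + vals[i-3]
--     # return the solution for n from array
--     return vals[n-1]
-- ===== SOURCE B (Python) =====
-- def block_puzzle_bottomup(n):
--     # fast-doubling Fibonacci: _fd(k) = (F(k), F(k+1)) with F(0)=0, F(1)=1.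
--     # The puzzle count for n is F(n+1).
--     def _fd(k):
--         if k == 0:
--             return (0, 1)
--         a, b = _fd(k // 2)
--         c = a * (2 * b - a)
--         d = a * a + b * b
--         if k % 2 == 1:
--             return (d, c + d)
--         return (c, d)
--     return _fd(n + 1)[0]
-- ===== Notes on version B (the rewrite author's own statement) =====
-- stated objective: faster
-- what changed: replaced the O(n) bottom-up DP array with fast-doubling on the Fibonacci recurrence (the answer is Fib(n+1)), computing it in O(log n) multiplications with no array
-- outside the precondition, e.g. on block_puzzle_bottomup(0): A raises IndexError, B returns 1
import Mathlib
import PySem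

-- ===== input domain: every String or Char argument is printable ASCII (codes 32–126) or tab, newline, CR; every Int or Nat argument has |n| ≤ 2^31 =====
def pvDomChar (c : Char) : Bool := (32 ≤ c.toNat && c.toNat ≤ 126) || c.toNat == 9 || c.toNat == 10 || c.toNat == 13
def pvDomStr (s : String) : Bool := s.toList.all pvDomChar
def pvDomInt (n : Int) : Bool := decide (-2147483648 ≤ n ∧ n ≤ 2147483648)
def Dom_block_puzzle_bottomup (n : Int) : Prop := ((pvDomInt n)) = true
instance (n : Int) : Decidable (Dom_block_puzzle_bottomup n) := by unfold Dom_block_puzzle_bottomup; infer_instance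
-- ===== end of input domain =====

-- B replaces A's O(n) bottom-up DP array with fast-doubling on the Fibonacci recurrence
-- (the answer is Fib(n+1)), an asymptotically faster algorithm.


-- ===== PORT A =====
-- literal transliteration of A: vals = [0]*n; base cases; for i in range(3, n+1):
-- vals[i-1] = vals[i-2] + vals[i-3]; return vals[n-1]  (pyGetD/pySetD total forms, in range under Pre_)
def block_puzzle_bottomup (n : Int) : Int :=
  let vals : List Int := List.replicate n.toNat 0
  let vals := if n ≥ 1 then PySem.List.pySetD vals 0 1 else vals
  let vals := if n ≥ 2 then PySem.List.pySetD vals 1 2 else vals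
  let vals := (PySem.List.pyRange 3 (n + 1) 1).foldl
    (fun vals i =>
      PySem.List.pySetD vals (i - 1)
        (PySem.List.pyGetD vals (i - 2) 0 + PySem.List.pyGetD vals (i - 3) 0)) vals
  PySem.List.pyGetD vals (n - 1) 0

-- ===== PORT B =====
-- fast doubling (Source B's _fd): pvFd k = (F(k), F(k+1)); B returns F(n+1)
def pvFd : Nat → Int × Int
  | 0 => (0, 1)
  | (k + 1) =>
    let p := pvFd ((k + 1) / 2)
    let a := p.1
    let b := p.2
    let c := a * (2 * b - a)
    let d := a * a + b * b
    if (k + 1) % 2 = 1 then (d, c + d) else (c, d)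

def block_puzzle_bottomup_alt (n : Int) : Int := (pvFd (n + 1).toNat).1

-- ===== PRECONDITION & SPEC =====
-- Pre_: A raises IndexError at vals[n-1] for every n ≤ 0 (vals is empty or too short)
def Pre_block_puzzle_bottomup (n : Int) : Prop := 1 ≤ n
instance (n : Int) : Decidable (Pre_block_puzzle_bottomup n) := by unfold Pre_block_puzzle_bottomup; infer_instance
def pvWitness_block_puzzle_bottomup : Int := 5

def Spec_block_puzzle_bottomup (n : Int) (out : Int) : Prop := out = block_puzzle_bottomup_alt n
instance (n : Int) (out : Int) : Decidable (Spec_block_puzzle_bottomup n out) := by unfold Spec_block_puzzle_bottomup; infer_instance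

-- ===== CLAIM (what is proved, stated in full; the proofs are below) =====
def Claim_equal_block_puzzle_bottomup : Prop := ∀ (n : Int), Dom_block_puzzle_bottomup n → Pre_block_puzzle_bottomup n → Spec_block_puzzle_bottomup n (block_puzzle_bottomup n)

-- ===== LEMMAS AND PROOFS =====

-- Fibonacci over Int
def pvFib (k : Nat) : Int := (Nat.fib k : Int)

theorem pvFib_add_two (k : Nat) : pvFib (k + 2) = pvFib k + pvFib (k + 1) := by
  simp [pvFib, Nat.fib_add_two]

theorem pvFib_add (m k : Nat) :
    pvFib (m + k + 1) = pvFib m * pvFib k + pvFib (m + 1) * pvFib (k + 1) := by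
  simp only [pvFib]
  have := Nat.fib_add m k
  push_cast [this]
  ring

theorem pvFib_double_odd (m : Nat) :
    pvFib (2 * m + 1) = pvFib m * pvFib m + pvFib (m + 1) * pvFib (m + 1) := by
  have h : 2 * m + 1 = m + m + 1 := by omega
  rw [h, pvFib_add m m]

theorem pvFib_double_even (m : Nat) (hm : 1 ≤ m) :
    pvFib (2 * m) = pvFib m * (2 * pvFib (m + 1) - pvFib m) := by
  obtain ⟨t, rfl⟩ : ∃ t, m = t + 1 := ⟨m - 1, by omega⟩
  have h : 2 * (t + 1) = t + (t + 1) + 1 := by omega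
  have h2 := pvFib_add t (t + 1)
  have h3 := pvFib_add_two t
  rw [h, h2]
  have h4 : t + 1 + 1 = t + 2 := rfl
  rw [h4]
  linear_combination (-pvFib (t + 1)) * h3

theorem pvFd_eq (k : Nat) : pvFd k = (pvFib k, pvFib (k + 1)) := by
  induction k using Nat.strong_induction_on with
  | _ k ih =>
    match k with
    | 0 => simp [pvFd, pvFib]
    | (k + 1) =>
      have h2 : (k + 1) / 2 < k + 1 := Nat.div_lt_self (Nat.succ_pos k) (by omega)
      have ihh := ih ((k + 1) / 2) h2
      rw [pvFd, ihh]
      by_cases hpar : (k + 1) % 2 = 1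
      · have hk : k + 1 = 2 * ((k + 1) / 2) + 1 := by omega
        simp only [hpar]
        set m := (k + 1) / 2 with hm
        have e1 : pvFib (k + 1) = pvFib m * pvFib m + pvFib (m + 1) * pvFib (m + 1) := by
          rw [hk, pvFib_double_odd]
        have e2 : pvFib (k + 1 + 1) = pvFib m * (2 * pvFib (m + 1) - pvFib m)
            + (pvFib m * pvFib m + pvFib (m + 1) * pvFib (m + 1)) := by
          have hk2 : k + 1 + 1 = 2 * (m + 1) := by omega
          rw [hk2, pvFib_double_even (m + 1) (by omega)]
          have h4 : m + 1 + 1 = m + 2 := rfl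
          rw [h4, pvFib_add_two m]
          ring
        simp [e1, e2]
      · have hk : k + 1 = 2 * ((k + 1) / 2) := by omega
        simp only [hpar]
        set m := (k + 1) / 2 with hm
        have hm1 : 1 ≤ m := by omega
        have e1 : pvFib (k + 1) = pvFib m * (2 * pvFib (m + 1) - pvFib m) := by
          rw [hk, pvFib_double_even m hm1]
        have e2 : pvFib (k + 1 + 1) = pvFib m * pvFib m + pvFib (m + 1) * pvFib (m + 1) := by
          have hk2 : k + 1 + 1 = 2 * m + 1 := by omega
          rw [hk2, pvFib_double_odd]
        simp [e1, e2]

theorem alt_eq_fib (n : Int) : block_puzzle_bottomup_alt n = pvFib (n + 1).toNat := by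
  simp [block_puzzle_bottomup_alt, pvFd_eq]

-- A's loop body as a named function (definitionally the lambda in the port)
def pvStep (vals : List Int) (i : Int) : List Int :=
  PySem.List.pySetD vals (i - 1)
    (PySem.List.pyGetD vals (i - 2) 0 + PySem.List.pyGetD vals (i - 3) 0)

-- invariant for A's loop: after processing range(3, m+1), entry j holds Fib(j+2) for all j < m
theorem pv_loop_inv (N : Nat) (hN : 2 ≤ N) (m : Nat) (hm2 : 2 ≤ m) (hmN : m ≤ N) :
    ((PySem.List.pyRange 3 ((m : Int) + 1) 1).foldl pvStep
        (((List.replicate N (0 : Int)).set 0 1).set 1 2)).length = N ∧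
    ∀ j : Nat, j < m →
      ((PySem.List.pyRange 3 ((m : Int) + 1) 1).foldl pvStep
          (((List.replicate N (0 : Int)).set 0 1).set 1 2)).getD j 0 = pvFib (j + 2) := by
  induction m, hm2 using Nat.le_induction with
  | base =>
    have hr : PySem.List.pyRange 3 ((2 : Nat) + 1 : Int) 1 = [] := by
      rw [PySem.List.pyRange_one_eq_nil]; norm_num
    rw [hr]
    simp only [List.foldl_nil]
    refine ⟨by simp, ?_⟩
    intro j hj
    have h0 : 0 < N := by omega
    have h1 : 1 < N := by omega
    interval_cases j
    · simp [List.getD, List.getElem?_replicate, h0]; decide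
    · simp [List.getD, List.getElem?_replicate, h1]; decide
  | succ m hm2 ih =>
    have ih := ih (by omega)
    set V := (PySem.List.pyRange 3 ((m : Int) + 1) 1).foldl pvStep
        (((List.replicate N (0 : Int)).set 0 1).set 1 2) with hV
    obtain ⟨hlen, hval⟩ := ih
    have hr : PySem.List.pyRange 3 ((m + 1 : Nat) + 1 : Int) 1
        = PySem.List.pyRange 3 ((m : Int) + 1) 1 ++ [(m : Int) + 1] := by
      push_cast
      exact PySem.List.pyRange_one_succ_right (by omega)
    rw [hr, List.foldl_append]
    rw [← hV]
    simp only [List.foldl_cons, List.foldl_nil]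
    have e1 : (m : Int) + 1 - 1 = ((m : Nat) : Int) := by omega
    have e2 : (m : Int) + 1 - 2 = ((m - 1 : Nat) : Int) := by omega
    have e3 : (m : Int) + 1 - 3 = ((m - 2 : Nat) : Int) := by omega
    have hstep : pvStep V ((m : Int) + 1) = V.set m (pvFib (m + 2)) := by
      rw [pvStep, e1, e2, e3, PySem.List.pySetD_natCast, PySem.List.pyGetD_natCast,
        PySem.List.pyGetD_natCast]
      have g1 : V.getD (m - 1) 0 = pvFib (m - 1 + 2) := hval (m - 1) (by omega)
      have g2 : V.getD (m - 2) 0 = pvFib (m - 2 + 2) := hval (m - 2) (by omega)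
      have i1 : m - 1 + 2 = m + 1 := by omega
      have i2 : m - 2 + 2 = m := by omega
      rw [g1, g2, i1, i2, pvFib_add_two m]
      ring_nf
    rw [hstep]
    refine ⟨by simp [hlen], ?_⟩
    intro j hj
    by_cases hjm : j = m
    · subst hjm
      have hjlen : j < V.length := by omega
      simp [List.getD, hjlen]
    · have := hval j (by omega)
      simpa [List.getD, List.getElem?_set, Ne.symm hjm] using this

-- ===== VERDICT (by name: the statement is the Claim_ definition above) =====
theorem block_puzzle_bottomup_spec : Claim_equal_block_puzzle_bottomup := by
  intro n _ hpre
  unfold Spec_block_puzzle_bottomup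
  rw [alt_eq_fib]
  have hn1 : (1 : Int) ≤ n := hpre
  by_cases h1 : n = 1
  · subst h1; decide
  · have hn2 : (2 : Int) ≤ n := by omega
    set N : Nat := n.toNat with hNdef
    have hn : n = (N : Int) := by omega
    have hN2 : 2 ≤ N := by omega
    simp only [block_puzzle_bottomup]
    rw [if_pos (by omega : n ≥ 1), if_pos (by omega : n ≥ 2)]
    rw [PySem.List.pySetD_of_nonneg _ _ (by norm_num : (0:Int) ≤ 0),
      PySem.List.pySetD_of_nonneg _ _ (by norm_num : (0:Int) ≤ 1)]
    have ht0 : (0 : Int).toNat = 0 := rfl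
    have ht1 : (1 : Int).toNat = 1 := rfl
    rw [ht0, ht1, hn, Int.toNat_natCast]
    have hinv := pv_loop_inv N hN2 N hN2 (le_refl N)
    obtain ⟨hlen, hval⟩ := hinv
    have hfold : (fun (vals : List Int) (i : Int) =>
        PySem.List.pySetD vals (i - 1)
          (PySem.List.pyGetD vals (i - 2) 0 + PySem.List.pyGetD vals (i - 3) 0)) = pvStep := rfl
    rw [hfold]
    have e : ((N : Int)) - 1 = ((N - 1 : Nat) : Int) := by omega
    rw [e, PySem.List.pyGetD_natCast]
    rw [hval (N - 1) (by omega)]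
    have e2 : ((N : Int) + 1).toNat = N + 1 := by omega
    have e3 : N - 1 + 2 = N + 1 := by omega
    rw [e2, e3]
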